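-- pv_equiv track=rewrite | github.com/anhttdevbm/ai-agent-rekkieedu | cham_bai/group_activity.py | _yescribe_auth_header_variants
-- ===== SOURCE A (Python) =====
-- def _yescribe_auth_header_variants(token: str) -> list[dict[str, str]]:
--     t = (token or "").strip()
--     if not t:
--         return [{}]
--     low = t.lower()
--     out: list[dict[str, str]] = []
--     if low.startswith("bearer "):
--         out.append({"Authorization": t})
--     else:
--         out.append({"Authorization": f"Bearer {t}"})
--         out.append({"X-API-Key": t})
--         out.append({"Authorization": t})
--     # giữ thứ tự, bỏ trùng
--     seen: set[tuple[tuple[str, str], ...]] = set()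
--     uniq: list[dict[str, str]] = []
--     for h in out:
--         key = tuple(sorted(h.items()))
--         if key not in seen:
--             seen.add(key)
--             uniq.append(h)
--     return uniq
-- ===== SOURCE B (Python) =====
-- _TEMPLATES = {
--     "empty":  [[]],
--     "bearer": [[("Authorization", "{}")]],
--     "plain":  [[("Authorization", "Bearer {}")],
--                [("X-API-Key", "{}")],
--                [("Authorization", "{}")]],
-- }
--
--
-- def _classify(t: str) -> str:
--     if not t:
--         return "empty"
--     if t.lower().startswith("bearer "):
--         return "bearer"
--     return "plain"
--
--
-- def _yescribe_auth_header_variants(token: str) -> list[dict[str, str]]: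
--     t = (token or "").strip()
--     return [{k: v.replace("{}", t) for k, v in pairs}
--             for pairs in _TEMPLATES[_classify(t)]]
-- ===== Notes on version B (the rewrite author's own statement) =====
-- stated objective: alternative
-- what changed: A builds the candidate dict list branch by branch and then runs a second dedup pass keyed by sorted items; B is table-driven: it classifies the token into one of three kinds, looks the kind up in a static template table of header pairs, and renders the templates by substituting the token, with no build-then-filter pass.
import Mathlib
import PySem

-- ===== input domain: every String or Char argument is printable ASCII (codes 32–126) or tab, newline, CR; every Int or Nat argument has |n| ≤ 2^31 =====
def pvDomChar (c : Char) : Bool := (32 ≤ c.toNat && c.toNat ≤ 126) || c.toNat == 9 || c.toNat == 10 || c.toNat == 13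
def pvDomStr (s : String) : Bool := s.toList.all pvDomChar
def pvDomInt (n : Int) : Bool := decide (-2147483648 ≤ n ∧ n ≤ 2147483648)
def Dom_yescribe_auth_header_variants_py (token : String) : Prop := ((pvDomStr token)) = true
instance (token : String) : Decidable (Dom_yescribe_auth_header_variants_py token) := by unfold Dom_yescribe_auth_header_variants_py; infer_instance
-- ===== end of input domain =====

-- B replaces A's build-then-filter construction with a table-driven one: classify the
-- token, look the class up in a static template table, render by substitution; objective: alternative.

-- ===== PORT A =====
def yescribe_auth_header_variants_py (token : String) : List (List (String × String)) :=
  if PySem.Str.strip token = "" then [[]]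
  else
    ((if PySem.Str.startswith (PySem.Str.lower (PySem.Str.strip token)) "bearer " then
        [[("Authorization", PySem.Str.strip token)]]
      else
        [[("Authorization", "Bearer " ++ PySem.Str.strip token)],
         [("X-API-Key", PySem.Str.strip token)],
         [("Authorization", PySem.Str.strip token)]]).foldl
      (fun (acc : PySem.Set (List (String × String)) × List (List (String × String))) h =>
        let key := PySem.List.sorted2 h Prod.fst Prod.snd false
        if PySem.Set.contains acc.1 key then acc
        else (PySem.Set.add acc.1 key, acc.2 ++ [h]))
      (PySem.Set.empty, [])).2

-- ===== PORT B =====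
-- static template table: kind ↦ list of header dicts given as (key, value-template) pairs
def pvTemplates : PySem.Dict String (List (List (String × String))) :=
  PySem.Dict.ofList
  [("empty",  [[]]),
   ("bearer", [[("Authorization", "{}")]]),
   ("plain",  [[("Authorization", "Bearer {}")],
               [("X-API-Key", "{}")],
               [("Authorization", "{}")]])]

def pvClassify (t : String) : String :=
  if t = "" then "empty"
  else if PySem.Str.startswith (PySem.Str.lower t) "bearer " then "bearer"
  else "plain"

def yescribe_auth_header_variants_py_alt (token : String) : List (List (String × String)) :=
  let t := PySem.Str.strip token
  (PySem.Dict.getD pvTemplates (pvClassify t) []).map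
    (fun pairs => pairs.map (fun kv => (kv.1, PySem.Str.replace kv.2 "{}" t)))

-- ===== PRECONDITION & SPEC =====
def Spec_yescribe_auth_header_variants_py (token : String) (out : List (List (String × String))) : Prop := out = yescribe_auth_header_variants_py_alt token
instance (token : String) (out : List (List (String × String))) : Decidable (Spec_yescribe_auth_header_variants_py token out) := by unfold Spec_yescribe_auth_header_variants_py; infer_instance

-- ===== CLAIM =====
def Claim_equal_yescribe_auth_header_variants_py : Prop := ∀ (token : String), Dom_yescribe_auth_header_variants_py token → Spec_yescribe_auth_header_variants_py token (yescribe_auth_header_variants_py token)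

-- ===== LEMMAS AND PROOFS =====

-- rendering the hole-only template just substitutes the token
theorem pv_replace_hole (t : String) : PySem.Str.replace "{}" "{}" t = t := by
  have h : (PySem.Str.replace "{}" "{}" t).toList = t.toList := by
    simp [PySem.Str.replace, PySem.Chars.replace, PySem.Chars.replace.go]
  exact String.toList_injective h

theorem pv_replace_bearer (t : String) :
    PySem.Str.replace "Bearer {}" "{}" t = "Bearer " ++ t := by
  have h : (PySem.Str.replace "Bearer {}" "{}" t).toList = ("Bearer " ++ t).toList := by
    simp [PySem.Str.replace, PySem.Chars.replace, PySem.Chars.replace.go]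
  exact String.toList_injective h

-- "Bearer " ++ t is strictly longer than t, hence different.
theorem pv_bearer_ne (t : String) : t ≠ "Bearer " ++ t := by
  intro h
  have := congrArg String.length h
  simp [String.length_append] at this

theorem pv_main (token : String) :
    yescribe_auth_header_variants_py token = yescribe_auth_header_variants_py_alt token := by
  unfold yescribe_auth_header_variants_py yescribe_auth_header_variants_py_alt pvClassify pvTemplates
  by_cases h0 : PySem.Str.strip token = ""
  · simp [h0, PySem.Dict.getD, PySem.Dict.get?, PySem.Dict.ofList, PySem.Dict.empty, PySem.Dict.update, PySem.Dict.insert, PySem.Dict.items, List.find?]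
  · by_cases hb : PySem.Str.startswith (PySem.Str.lower (PySem.Str.strip token)) "bearer " = true
    · simp only [if_neg h0, if_pos hb]
      simp [PySem.Set.contains, PySem.Set.empty, List.foldl,
        PySem.Dict.getD, PySem.Dict.get?, PySem.Dict.ofList, PySem.Dict.empty, PySem.Dict.update, PySem.Dict.insert, PySem.Dict.items, List.find?, pv_replace_hole]
    · simp only [if_neg h0, if_neg hb]
      have h2 : PySem.Str.strip token ≠ "Bearer " ++ PySem.Str.strip token :=
        pv_bearer_ne (PySem.Str.strip token)
      simp [PySem.Set.contains, PySem.Set.empty, PySem.Set.add,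
        PySem.List.sorted2, PySem.List.insertBy, List.foldl, h2,
        PySem.Dict.getD, PySem.Dict.get?, PySem.Dict.ofList, PySem.Dict.empty, PySem.Dict.update, PySem.Dict.insert, PySem.Dict.items, List.find?, pv_replace_hole, pv_replace_bearer]

-- ===== VERDICT =====
theorem yescribe_auth_header_variants_py_spec : Claim_equal_yescribe_auth_header_variants_py := by
  intro token _
  unfold Spec_yescribe_auth_header_variants_py
  exact pv_main token
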